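-- pv_equiv track=rewrite | github.com/TzviAharon/Bootcamp-all-files | ex3_TAU/ex3_012345678.py | even_vowels
-- ===== SOURCE A (Python) =====
-- VOWELS = "AEIOU"
--
-- def even_vowels(sentence):
--     counter = 0
--     for char in sentence.upper():
--         if char in VOWELS:
--             counter+=1
--
--     if counter%2 == 0:
--         return True
--
--     return False
-- ===== SOURCE B (Python) =====
-- VOWELS = "AEIOU"
--
-- def even_vowels(sentence):
--     upper = sentence.upper()
--     total = sum(upper.count(v) for v in VOWELS)
--     return total % 2 == 0
-- ===== Notes on version B (the rewrite author's own statement) =====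
-- stated objective: idiomatic
-- what changed: Instead of one character-by-character pass testing membership in VOWELS with a manual counter and an if/return-True/False tail, B loops over the five vowel letters, counts each with str.count, sums, and returns the parity comparison directly.
import Mathlib
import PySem

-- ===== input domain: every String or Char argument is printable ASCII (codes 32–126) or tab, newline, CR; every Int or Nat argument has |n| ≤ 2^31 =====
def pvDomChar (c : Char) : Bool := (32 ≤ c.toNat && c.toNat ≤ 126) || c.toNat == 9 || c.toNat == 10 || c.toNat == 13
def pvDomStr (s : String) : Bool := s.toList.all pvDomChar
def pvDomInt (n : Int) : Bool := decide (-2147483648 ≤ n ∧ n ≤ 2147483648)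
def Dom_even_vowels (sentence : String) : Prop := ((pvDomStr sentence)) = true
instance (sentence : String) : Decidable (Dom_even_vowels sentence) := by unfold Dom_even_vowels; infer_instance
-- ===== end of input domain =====

-- B replaces A's character-by-character membership loop with five str.count scans summed (idiomatic; a timing run measured it faster by a constant factor).


-- ===== PORT A =====
-- VOWELS = "AEIOU"
def pyVOWELS : List Char := "AEIOU".toList

-- counter = 0; for char in sentence.upper(): if char in VOWELS: counter += 1; return counter % 2 == 0 (via if/True/False)
def even_vowels (sentence : String) : Bool :=
  let counter : Int :=
    (PySem.Chars.upper sentence.toList).foldl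
      (fun c ch => if PySem.Chars.isIn [ch] pyVOWELS then c + 1 else c) 0
  if PySem.Int.mod counter 2 = 0 then true else false

-- ===== PORT B =====
-- upper = sentence.upper(); total = sum(upper.count(v) for v in VOWELS); return total % 2 == 0
def even_vowels_alt (sentence : String) : Bool :=
  let upper := PySem.Chars.upper sentence.toList
  let total : Int := (pyVOWELS.map (fun v => (PySem.Chars.count upper [v] : Int))).sum
  decide (PySem.Int.mod total 2 = 0)

-- ===== PRECONDITION & SPEC =====
def Spec_even_vowels (sentence : String) (out : Bool) : Prop := out = even_vowels_alt sentence
instance (sentence : String) (out : Bool) : Decidable (Spec_even_vowels sentence out) := by unfold Spec_even_vowels; infer_instance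

-- ===== CLAIM (what is proved, stated in full; the proofs are below) =====
def Claim_equal_even_vowels : Prop := ∀ (sentence : String), Dom_even_vowels sentence → Spec_even_vowels sentence (even_vowels sentence)

-- ===== LEMMAS AND PROOFS =====

-- PySem.Chars.count with a single-character needle is List.count.
theorem count_go_single (v : Char) : ∀ (l : List Char) (fuel acc : Nat), l.length ≤ fuel →
    PySem.Chars.count.go [v] fuel l acc = acc + l.count v := by
  intro l
  induction l with
  | nil => intro fuel acc _; cases fuel <;> simp [PySem.Chars.count.go]
  | cons h t ih =>
    intro fuel acc hf
    cases fuel with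
    | zero => simp at hf
    | succ f =>
      rw [PySem.Chars.count.go]
      simp only [List.length_cons] at hf
      by_cases hv : v = h
      · have hp : ([v].isPrefixOf (h :: t)) = true := by simp [List.isPrefixOf, hv]
        simp only [hp, if_true, List.length_singleton, List.drop_one, List.tail_cons]
        rw [ih f (acc + 1) (by omega)]
        simp [hv]
        omega
      · have hp : ([v].isPrefixOf (h :: t)) = false := by
          simp only [List.isPrefixOf, Bool.and_eq_false_iff]
          left; exact beq_eq_false_iff_ne.mpr hv
        simp only [hp, Bool.false_eq_true, if_false]
        rw [ih f acc (by omega)]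
        rw [List.count_cons]
        have : (h == v) = false := beq_eq_false_iff_ne.mpr (fun e => hv e.symm)
        simp [this]

theorem count_single (v : Char) (s : List Char) : PySem.Chars.count s [v] = s.count v := by
  simp [PySem.Chars.count, count_go_single v s s.length 0 le_rfl]

-- 'char in "AEIOU"' for a single character is list membership.
theorem isIn_single (c : Char) (s : List Char) : PySem.Chars.isIn [c] s = decide (c ∈ s) := by
  by_cases h : c ∈ s
  · have h2 : PySem.Chars.isIn [c] s = true :=
      (PySem.Chars.isIn_iff_infix [c] s).mpr ((List.singleton_infix_iff c s).mpr h)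
    simp [h2, h]
  · have h3 : PySem.Chars.isIn [c] s = false := by
      rcases hb : PySem.Chars.isIn [c] s with _ | _
      · rfl
      · exact absurd ((List.singleton_infix_iff c s).mp ((PySem.Chars.isIn_iff_infix [c] s).mp hb)) h
    simp [h3, h]

def vowelChars : List Char := ['A', 'E', 'I', 'O', 'U']

theorem pyVOWELS_eq : pyVOWELS = vowelChars := by decide

-- the membership count equals the sum of the five per-vowel counts
theorem countP_vowels (l : List Char) :
    l.countP (fun ch => decide (ch ∈ vowelChars)) =
      l.count 'A' + l.count 'E' + l.count 'I' + l.count 'O' + l.count 'U' := by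
  induction l with
  | nil => simp
  | cons h t ih =>
    simp only [List.countP_cons, List.count_cons, ih]
    by_cases hm : h ∈ vowelChars
    · simp only [vowelChars, List.mem_cons, List.not_mem_nil, or_false] at hm
      rcases hm with h1 | h1 | h1 | h1 | h1 <;> subst h1 <;> simp [vowelChars] <;> omega
    · have hd : (decide (h ∈ vowelChars)) = false := by simp [hm]
      simp only [vowelChars, List.mem_cons, List.not_mem_nil, or_false, not_or] at hm
      obtain ⟨h1, h2, h3, h4, h5⟩ := hm
      simp [hd, beq_eq_false_iff_ne.mpr h1, beq_eq_false_iff_ne.mpr h2,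
            beq_eq_false_iff_ne.mpr h3, beq_eq_false_iff_ne.mpr h4,
            beq_eq_false_iff_ne.mpr h5]

-- ===== VERDICT (by name: the statement is the Claim_ definition above) =====
theorem even_vowels_spec : Claim_equal_even_vowels := by
  intro sentence _
  unfold Spec_even_vowels
  unfold even_vowels even_vowels_alt
  simp only [pyVOWELS_eq]
  set up := PySem.Chars.upper sentence.toList with hup
  have hfold :
      up.foldl (fun c ch => if PySem.Chars.isIn [ch] vowelChars then c + 1 else c) (0 : Int)
        = ((up.countP (fun ch => decide (ch ∈ vowelChars)) : Nat) : Int) := by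
    rw [PySem.List.foldl_ite_add_one (fun ch => PySem.Chars.isIn [ch] vowelChars = true) up (0 : Int)]
    rw [zero_add]
    congr 1
    apply List.countP_congr
    intro a _
    simp [isIn_single]
  have hsum :
      (vowelChars.map (fun v => (PySem.Chars.count up [v] : Int))).sum
        = ((up.countP (fun ch => decide (ch ∈ vowelChars)) : Nat) : Int) := by
    have hc := countP_vowels up
    simp only [vowelChars, List.map_cons, List.map_nil, List.sum_cons, List.sum_nil,
      count_single] at hc ⊢
    rw [hc]
    push_cast
    ring
  simp only [hfold, hsum]
  split_ifs with h
  · exact (decide_eq_true h).symm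
  · exact (decide_eq_false h).symm
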